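-- pv_equiv track=rewrite | github.com/T300Y/WordNet | main.py | embedded_word
-- ===== SOURCE A (Python) =====
-- def embedded_word(word, dictionary):
--     score = 0
--     word_length = len(word)
--     for i in range(word_length):
--         for j in range(i + 1, word_length + 1):
--             if len(word[i:j]) > 2:
--                 for wordy in dictionary:
--                     if len(wordy) == len(word[i:j]):
--                         if wordy == word[i:j] and word != word[i:j]:
--                             score +=10
--                             break
--
--     return score
-- ===== SOURCE B (Python) =====
-- def embedded_word(word, dictionary):
--     score = 0
--     n = len(word)
--     for w in set(dictionary):
--         lw = len(w)
--         if lw > 2 and w != word: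
--             for i in range(n - lw + 1):
--                 if word[i:i+lw] == w:
--                     score += 10
--     return score
-- ===== Notes on version B (the rewrite author's own statement) =====
-- stated objective: faster
-- what changed: Inverts the nesting: instead of enumerating all O(n^2) substrings and scanning the whole dictionary for each, B deduplicates the dictionary once into a set and, for each distinct qualifying word, slides it over the text counting overlapping occurrences.
import Mathlib
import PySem

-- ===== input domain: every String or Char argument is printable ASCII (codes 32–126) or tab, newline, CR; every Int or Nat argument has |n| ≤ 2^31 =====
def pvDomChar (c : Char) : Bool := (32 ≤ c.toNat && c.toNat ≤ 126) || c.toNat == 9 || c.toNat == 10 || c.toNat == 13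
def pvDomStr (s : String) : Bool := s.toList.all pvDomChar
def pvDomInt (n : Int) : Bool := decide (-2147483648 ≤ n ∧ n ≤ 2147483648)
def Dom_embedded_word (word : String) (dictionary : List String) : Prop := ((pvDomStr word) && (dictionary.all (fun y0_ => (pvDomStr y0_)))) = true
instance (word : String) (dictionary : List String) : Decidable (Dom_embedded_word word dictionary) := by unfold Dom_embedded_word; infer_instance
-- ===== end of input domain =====

-- B inverts the nesting: it dedups the dictionary into a set once and counts overlapping
-- occurrences of each distinct qualifying dictionary word in the text (objective: faster).


-- ===== PORT A =====
-- the inner 'for wordy in dictionary: … break' loop of A: stops (scoring 10) at the first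
-- dictionary entry equal to sub (when sub differs from word)
def pvDictScan (word sub : String) : List String → Int → Int
  | [], score => score
  | wordy :: rest, score =>
    if PySem.Str.len wordy = PySem.Str.len sub then
      if wordy = sub ∧ word ≠ sub then score + 10
      else pvDictScan word sub rest score
    else pvDictScan word sub rest score

def embedded_word (word : String) (dictionary : List String) : Int :=
  let word_length := PySem.Str.len word
  (PySem.List.pyRange 0 word_length 1).foldl (fun score i =>
    (PySem.List.pyRange (i + 1) (word_length + 1) 1).foldl (fun score j =>
      if PySem.Str.len (PySem.Str.slice word (some i) (some j)) > 2 then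
        pvDictScan word (PySem.Str.slice word (some i) (some j)) dictionary score
      else score) score) 0

-- ===== PORT B =====
def embedded_word_alt (word : String) (dictionary : List String) : Int :=
  let n := PySem.Str.len word
  (PySem.Set.ofList dictionary).foldl (fun score w =>
    let lw := PySem.Str.len w
    if lw > 2 ∧ w ≠ word then
      (PySem.List.pyRange 0 (n - lw + 1) 1).foldl (fun score i =>
        if PySem.Str.slice word (some i) (some (i + lw)) = w then score + 10 else score) score
    else score) 0

-- ===== PRECONDITION & SPEC =====
def Spec_embedded_word (word : String) (dictionary : List String) (out : Int) : Prop := out = embedded_word_alt word dictionary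
instance (word : String) (dictionary : List String) (out : Int) : Decidable (Spec_embedded_word word dictionary out) := by unfold Spec_embedded_word; infer_instance

-- ===== CLAIM (what is proved, stated in full; the proofs are below) =====
def Claim_equal_embedded_word : Prop := ∀ (word : String) (dictionary : List String), Dom_embedded_word word dictionary → Spec_embedded_word word dictionary (embedded_word word dictionary)

-- ===== LEMMAS AND PROOFS =====
theorem pvSum_swap {α β : Type} (l1 : List α) (l2 : List β) (f : α → β → Int) :
    (l1.map (fun a => ((l2.map (f a)).sum))).sum
      = (l2.map (fun b => ((l1.map (fun a => f a b)).sum))).sum := by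
  induction l1 with
  | nil => simp
  | cons a t ih => rw [List.map_cons, List.sum_cons, ih, ← PySem.List.sum_map_add_int]; simp

theorem pvSum_ite_eq {α : Type} [DecidableEq α] (l : List α) (h : l.Nodup) (t : α) (c : α → Int) :
    (l.map (fun x => if x = t then c x else 0)).sum = if t ∈ l then c t else 0 := by
  induction l with
  | nil => simp
  | cons a r ih =>
    rcases List.nodup_cons.mp h with ⟨hna, hr⟩
    simp only [List.map_cons, List.sum_cons, List.mem_cons, ih hr]
    by_cases ha : a = t
    · subst ha; simp [hna]
    · simp [ha, Ne.symm ha]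

theorem pvSum_pyRange_restrict (a b c' : Int) (f : Int → Int) (hb : c' ≤ b) :
    ((PySem.List.pyRange a b 1).map (fun i => if i < c' then f i else 0)).sum
      = ((PySem.List.pyRange a c' 1).map f).sum := by
  by_cases hca : c' ≤ a
  · rw [PySem.List.pyRange_one_eq_nil hca]
    have : ∀ i ∈ PySem.List.pyRange a b 1, (if i < c' then f i else 0) = 0 := by
      intro i hi
      have := PySem.List.mem_pyRange_one.mp hi
      rw [if_neg (by omega)]
    rw [List.map_congr_left this]
    simp
  · rw [PySem.List.pyRange_one_append a c' b (le_of_lt (lt_of_not_ge hca)) hb, List.map_append, List.sum_append]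
    have h1 : ∀ i ∈ PySem.List.pyRange a c' 1, (if i < c' then f i else 0) = f i := by
      intro i hi
      have := PySem.List.mem_pyRange_one.mp hi
      rw [if_pos (by omega)]
    have h2 : ∀ i ∈ PySem.List.pyRange c' b 1, (if i < c' then f i else 0) = 0 := by
      intro i hi
      have := PySem.List.mem_pyRange_one.mp hi
      rw [if_neg (by omega)]
    rw [List.map_congr_left h1, List.map_congr_left h2]
    simp

def pvSub (word : String) (i j : Int) : String := PySem.Str.slice word (some i) (some j)
def pvLen (s : String) : Int := (s.toList.length : Int)

def pvGA (word : String) (dictionary : List String) (i j : Int) : Int :=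
  if pvLen (pvSub word i j) > 2 ∧ pvSub word i j ∈ dictionary ∧ word ≠ pvSub word i j then 10 else 0

def pvC (word w : String) : Int := if pvLen w > 2 ∧ w ≠ word then 10 else 0

def pvGB (word w : String) : Int :=
  if pvLen w > 2 ∧ w ≠ word then
    ((PySem.List.pyRange 0 (pvLen word - pvLen w + 1) 1).map
      (fun i => if pvSub word i (i + pvLen w) = w then 10 else 0)).sum
  else 0


theorem pvDictScan_eq (word sub : String) (dict : List String) (score : Int) :
    pvDictScan word sub dict score = score + (if sub ∈ dict ∧ word ≠ sub then 10 else 0) := by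
  induction dict generalizing score with
  | nil => simp [pvDictScan]
  | cons wordy rest ih =>
    simp only [pvDictScan]
    by_cases hlen : PySem.Str.len wordy = PySem.Str.len sub
    · rw [if_pos hlen]
      by_cases heq : wordy = sub ∧ word ≠ sub
      · rw [if_pos heq]
        rcases heq with ⟨h1, h2⟩
        subst h1
        simp [h2]
      · rw [if_neg heq, ih]
        by_cases hw : wordy = sub
        · subst hw
          by_cases hws : word = wordy
          · simp [hws]
          · exact absurd ⟨rfl, Ne.symm (fun h => hws h.symm)⟩ heq
        · simp [List.mem_cons, Ne.symm hw]
    · rw [if_neg hlen, ih]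
      have hw : wordy ≠ sub := fun h => hlen (by rw [h])
      simp [List.mem_cons, Ne.symm hw]



theorem pvLen_eq : PySem.Str.len = pvLen := funext (fun s => PySem.Str.len_eq s)

theorem pvA_sum (word : String) (dictionary : List String) :
    embedded_word word dictionary =
      ((PySem.List.pyRange 0 (pvLen word) 1).map (fun i =>
        ((PySem.List.pyRange (i + 1) (pvLen word + 1) 1).map (pvGA word dictionary i)).sum)).sum := by
  show (PySem.List.pyRange 0 (PySem.Str.len word) 1).foldl _ 0 = _
  rw [pvLen_eq]
  have hinner : ∀ (i score : Int),
      (PySem.List.pyRange (i + 1) (pvLen word + 1) 1).foldl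
        (fun score j => if pvLen (PySem.Str.slice word (some i) (some j)) > 2 then
            pvDictScan word (PySem.Str.slice word (some i) (some j)) dictionary score else score) score
      = score + ((PySem.List.pyRange (i + 1) (pvLen word + 1) 1).map (pvGA word dictionary i)).sum := by
    intro i score
    rw [PySem.List.foldl_congr_mem _ _ (fun acc j => acc + pvGA word dictionary i j) _ ?_]
    · exact PySem.List.foldl_add _ _ _
    · intro acc j hj
      by_cases hlen : pvLen (PySem.Str.slice word (some i) (some j)) > 2
      · rw [if_pos hlen, pvDictScan_eq]
        simp [pvGA, pvSub, hlen]
      · rw [if_neg hlen]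
        simp [pvGA, pvSub, hlen]
  rw [PySem.List.foldl_congr_mem _ _
    (fun score i => score + ((PySem.List.pyRange (i + 1) (pvLen word + 1) 1).map (pvGA word dictionary i)).sum) _
    (fun acc i _ => hinner i acc)]
  rw [PySem.List.foldl_add]
  simp

theorem pvB_sum (word : String) (dictionary : List String) :
    embedded_word_alt word dictionary = ((PySem.Set.ofList dictionary).map (pvGB word)).sum := by
  show (PySem.Set.ofList dictionary).foldl _ 0 = _
  have hinner : ∀ (w : String) (score : Int),
      (PySem.List.pyRange 0 (pvLen word - pvLen w + 1) 1).foldl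
        (fun score i => if PySem.Str.slice word (some i) (some (i + pvLen w)) = w then score + 10 else score) score
      = score + ((PySem.List.pyRange 0 (pvLen word - pvLen w + 1) 1).map
          (fun i => if pvSub word i (i + pvLen w) = w then 10 else 0)).sum := by
    intro w score
    rw [PySem.List.foldl_congr_mem _ _
      (fun acc i => acc + (if pvSub word i (i + pvLen w) = w then 10 else 0)) _ ?_]
    · exact PySem.List.foldl_add _ _ _
    · intro acc i hi
      unfold pvSub
      split_ifs with h <;> simp [h]
  rw [PySem.List.foldl_congr_mem _ _ (fun score w => score + pvGB word w) _ ?_]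
  · rw [PySem.List.foldl_add]; simp
  · intro acc w hw
    rw [pvLen_eq]
    by_cases hc : pvLen w > 2 ∧ w ≠ word
    · rw [if_pos hc, hinner]
      show acc + _ = acc + pvGB word w
      simp only [pvGB]
      rw [if_pos hc]
    · rw [if_neg hc]
      show acc = acc + pvGB word w
      simp only [pvGB]
      rw [if_neg hc, add_zero]

theorem pvSub_length (word : String) (i j : Int) (hi0 : 0 ≤ i) (hin : i ≤ pvLen word)
    (hj0 : 0 ≤ j) (hjn : j ≤ pvLen word) :
    (pvSub word i j).toList.length = j.toNat - i.toNat := by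
  unfold pvSub
  rw [PySem.Str.toList_slice, PySem.Chars.slice_eq_listSlice,
    PySem.List.slice_of_nonneg _ hi0 hj0 (by unfold pvLen at hin; omega) (by unfold pvLen at hjn; omega)]
  rw [List.length_take, List.length_drop]
  unfold pvLen at hin hjn
  omega

theorem pvPoint (word w : String) (hm : 2 < pvLen w) (i j : Int)
    (hi : 0 ≤ i ∧ i < pvLen word) (hj : 1 ≤ j ∧ j < pvLen word + 1) :
    (if w = pvSub word i j then (10:Int) else 0)
      = if j = i + pvLen w then (if w = pvSub word i (i + pvLen w) then (10:Int) else 0) else 0 := by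
  by_cases hjm : j = i + pvLen w
  · rw [hjm, if_pos rfl]
  · rw [if_neg hjm, if_neg ?_]
    intro hw
    apply hjm
    have hlen := congrArg (fun s => s.toList.length) hw
    simp only at hlen
    rw [pvSub_length word i j (by omega) (by omega) (by omega) (by omega)] at hlen
    have hq : pvLen w = (w.toList.length : Int) := rfl
    omega

theorem pvExtend (word : String) (dictionary : List String) (i : Int)
    (hi : 0 ≤ i ∧ i < pvLen word) :
    ((PySem.List.pyRange (i + 1) (pvLen word + 1) 1).map (pvGA word dictionary i)).sum
      = ((PySem.List.pyRange 1 (pvLen word + 1) 1).map (pvGA word dictionary i)).sum := by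
  rw [PySem.List.pyRange_one_append 1 (i + 1) (pvLen word + 1) (by omega) (by omega),
    List.map_append, List.sum_append]
  have hz : ∀ j ∈ PySem.List.pyRange 1 (i + 1) 1, pvGA word dictionary i j = 0 := by
    intro j hj
    have hjb := PySem.List.mem_pyRange_one.mp hj
    unfold pvGA
    rw [if_neg]
    rintro ⟨h1, -⟩
    have hl := pvSub_length word i j (by omega) (by omega) (by omega) (by omega)
    have hq : pvLen (pvSub word i j) = ((pvSub word i j).toList.length : Int) := rfl
    omega
  rw [List.map_congr_left hz]
  simp

theorem pvDecomp (word : String) (dictionary : List String) (i j : Int) :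
    pvGA word dictionary i j
      = ((PySem.Set.ofList dictionary).map (fun w => if w = pvSub word i j then pvC word w else 0)).sum := by
  rw [pvSum_ite_eq _ (PySem.Set.nodup_ofList dictionary) (pvSub word i j) (pvC word)]
  unfold pvGA pvC
  simp only [PySem.Set.mem_ofList]
  by_cases hmem : pvSub word i j ∈ dictionary
  · rw [if_pos hmem]
    have hiff : (pvLen (pvSub word i j) > 2 ∧ pvSub word i j ∈ dictionary ∧ word ≠ pvSub word i j)
        ↔ (pvLen (pvSub word i j) > 2 ∧ pvSub word i j ≠ word) := by
      constructor
      · rintro ⟨a, -, c⟩; exact ⟨a, Ne.symm c⟩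
      · rintro ⟨a, c⟩; exact ⟨a, hmem, Ne.symm c⟩
    rw [if_congr hiff rfl rfl]
  · rw [if_neg hmem, if_neg (by tauto)]

theorem pvPerW (word w : String) :
    ((PySem.List.pyRange 0 (pvLen word) 1).map (fun i =>
      ((PySem.List.pyRange 1 (pvLen word + 1) 1).map
        (fun j => if w = pvSub word i j then pvC word w else 0)).sum)).sum
      = pvGB word w := by
  by_cases hc : pvLen w > 2 ∧ w ≠ word
  · have hc10 : pvC word w = 10 := by unfold pvC; rw [if_pos hc]
    simp only [hc10]
    have hstep : ∀ i ∈ PySem.List.pyRange 0 (pvLen word) 1,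
        ((PySem.List.pyRange 1 (pvLen word + 1) 1).map
          (fun j => if w = pvSub word i j then (10:Int) else 0)).sum
        = if i < pvLen word - pvLen w + 1 then
            (if w = pvSub word i (i + pvLen w) then (10:Int) else 0) else 0 := by
      intro i hi
      have hib := PySem.List.mem_pyRange_one.mp hi
      rw [List.map_congr_left (fun j hj =>
        pvPoint word w hc.1 i j hib (PySem.List.mem_pyRange_one.mp hj))]
      rw [pvSum_ite_eq _ (PySem.List.nodup_pyRange_one 1 (pvLen word + 1)) (i + pvLen w)
        (fun _ => if w = pvSub word i (i + pvLen w) then (10:Int) else 0)]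
      have hmemiff : (i + pvLen w ∈ PySem.List.pyRange 1 (pvLen word + 1) 1)
          ↔ i < pvLen word - pvLen w + 1 := by
        rw [PySem.List.mem_pyRange_one]
        have := hc.1
        omega
      rw [if_congr hmemiff rfl rfl]
    rw [List.map_congr_left hstep,
      pvSum_pyRange_restrict 0 (pvLen word) (pvLen word - pvLen w + 1) _ (by have := hc.1; omega)]
    simp only [pvGB]
    rw [if_pos hc]
    exact congrArg _ (List.map_congr_left (fun i _ => if_congr eq_comm rfl rfl))
  · have hc0 : pvC word w = 0 := by unfold pvC; rw [if_neg hc]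
    simp only [hc0, ite_self]
    simp only [pvGB]
    rw [if_neg hc]
    simp

theorem pvMain (word : String) (dictionary : List String) :
    embedded_word word dictionary = embedded_word_alt word dictionary := by
  rw [pvA_sum, pvB_sum]
  rw [List.map_congr_left (fun i hi =>
    pvExtend word dictionary i (PySem.List.mem_pyRange_one.mp hi))]
  have hdec : ∀ i ∈ PySem.List.pyRange 0 (pvLen word) 1,
      ((PySem.List.pyRange 1 (pvLen word + 1) 1).map (pvGA word dictionary i)).sum
      = ((PySem.Set.ofList dictionary).map (fun w =>
          ((PySem.List.pyRange 1 (pvLen word + 1) 1).map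
            (fun j => if w = pvSub word i j then pvC word w else 0)).sum)).sum := by
    intro i _
    rw [List.map_congr_left (fun j _ => pvDecomp word dictionary i j)]
    exact pvSum_swap _ _ _
  rw [List.map_congr_left hdec]
  rw [pvSum_swap]
  exact List.map_congr_left (fun w _ => pvPerW word w) ▸ rfl

-- ===== VERDICT (by name: the statement is the Claim_ definition above) =====
theorem embedded_word_spec : Claim_equal_embedded_word := by
  intro word dictionary _
  show embedded_word word dictionary = embedded_word_alt word dictionary
  exact pvMain word dictionary
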